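-- pv_equiv track=rewrite | github.com/brunomans/bibliotheek | utils.py | determine_next_id
-- ===== SOURCE A (Python) =====
-- def determine_next_id(library_ids):
--     if not library_ids:
--         return 0
--
--     # Sort the IDs to find gaps
--     sorted_ids = sorted(library_ids)
--
--     # Check for gaps in the sequence
--     for expected_id in range(sorted_ids[0], sorted_ids[-1] + 1):
--         if expected_id not in sorted_ids:
--             return expected_id
--
--     # If no gaps, return max ID + 1
--     return sorted_ids[-1] + 1
-- ===== SOURCE B (Python) =====
-- def determine_next_id(library_ids):
--     if not library_ids:
--         return 0
--     s = sorted(library_ids)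
--     prev = s[0]
--     for v in s[1:]:
--         if v > prev + 1:
--             return prev + 1
--         prev = v
--     return prev + 1
-- ===== Notes on version B (the rewrite author's own statement) =====
-- stated objective: alternative
-- what changed: Instead of testing every candidate in range(min,max+1) with a list membership scan, B walks the sorted list once comparing each adjacent pair and returns prev+1 at the first gap; worst case drops from O((max-min)*n) to O(n log n), though on random inputs both are sort-dominated.
import Mathlib
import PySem

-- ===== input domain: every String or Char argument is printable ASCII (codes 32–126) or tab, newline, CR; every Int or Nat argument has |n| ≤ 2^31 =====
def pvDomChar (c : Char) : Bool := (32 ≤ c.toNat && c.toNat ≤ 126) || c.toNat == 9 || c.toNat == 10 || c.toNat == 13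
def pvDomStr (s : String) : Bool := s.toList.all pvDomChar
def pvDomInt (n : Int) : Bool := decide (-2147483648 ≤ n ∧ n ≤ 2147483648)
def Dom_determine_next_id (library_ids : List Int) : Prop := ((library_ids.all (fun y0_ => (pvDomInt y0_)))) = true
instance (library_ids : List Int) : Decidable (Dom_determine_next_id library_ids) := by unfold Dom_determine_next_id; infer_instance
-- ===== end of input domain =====

-- B scans the sorted list once, returning at the first adjacent gap, instead of
-- testing each candidate in range(min, max+1) by list membership (objective: alternative).

-- ===== PORT A =====
-- A's 'for expected_id in range(first, lastv+1): if expected_id not in sorted_ids: return expected_id'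
-- ported as an early-exit recursion over the same range (falling through returns stop = lastv + 1)
def rangeGapLoop (sorted_ids : List Int) (expected_id stop : Int) : Int :=
  if expected_id < stop then
    if !(sorted_ids.contains expected_id) then expected_id
    else rangeGapLoop sorted_ids (expected_id + 1) stop
  else stop
termination_by (stop - expected_id).toNat
decreasing_by omega

def determine_next_id (library_ids : List Int) : Int :=
  if library_ids = [] then 0
  else
    let sorted_ids := PySem.List.sorted library_ids (fun x => x) false
    let first := (PySem.List.pyGet? sorted_ids 0).getD 0        -- sorted_ids[0]; list nonempty
    let lastv := (PySem.List.pyGet? sorted_ids (-1)).getD 0     -- sorted_ids[-1]; list nonempty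
    rangeGapLoop sorted_ids first (lastv + 1)

-- ===== PORT B =====
-- the for-loop of Source B over s[1:] with accumulator prev
def nextIdScan (prev : Int) : List Int → Int
  | [] => prev + 1
  | v :: rest => if v > prev + 1 then prev + 1 else nextIdScan v rest

def determine_next_id_alt (library_ids : List Int) : Int :=
  if library_ids = [] then 0
  else
    let s := PySem.List.sorted library_ids (fun x => x) false
    nextIdScan ((PySem.List.pyGet? s 0).getD 0) (PySem.List.slice s (some 1) none)

-- ===== PRECONDITION & SPEC =====
def Spec_determine_next_id (library_ids : List Int) (out : Int) : Prop := out = determine_next_id_alt library_ids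
instance (library_ids : List Int) (out : Int) : Decidable (Spec_determine_next_id library_ids out) := by unfold Spec_determine_next_id; infer_instance

-- ===== CLAIM (what is proved, stated in full; the proofs are below) =====
def Claim_equal_determine_next_id : Prop := ∀ (library_ids : List Int), Dom_determine_next_id library_ids → Spec_determine_next_id library_ids (determine_next_id library_ids)

-- ===== LEMMAS AND PROOFS =====

theorem find?_congr_mem {α : Type} (l : List α) (p q : α → Bool)
    (h : ∀ x ∈ l, p x = q x) : l.find? p = l.find? q := by
  induction l with
  | nil => rfl
  | cons x xs ih =>
    simp only [List.find?]
    rw [h x (List.mem_cons_self)]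
    cases q x
    · exact ih (fun y hy => h y (List.mem_cons_of_mem _ hy))
    · rfl

theorem head_le_getLast (v : Int) (t : List Int)
    (hp : (v :: t).Pairwise (· ≤ ·)) : v ≤ (v :: t).getLast (by simp) := by
  have hmem := List.getLast_mem (l := v :: t) (by simp)
  rcases List.mem_cons.mp hmem with h | h
  · omega
  · exact (List.pairwise_cons.mp hp).1 _ h

-- the early-exit loop computes exactly the first range element not in the list (else stop)
theorem rangeGapLoop_eq_find (s : List Int) (e stop : Int) :
    rangeGapLoop s e stop =
      (match (PySem.List.pyRange e stop 1).find? (fun x => !(s.contains x)) with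
       | some x => x
       | none => stop) := by
  by_cases h : e < stop
  · rw [rangeGapLoop, if_pos h, PySem.List.pyRange_one_cons h]
    simp only [List.find?]
    cases hc : (!(s.contains e)) with
    | true => simp
    | false => simpa using rangeGapLoop_eq_find s (e + 1) stop
  · rw [rangeGapLoop, if_neg h, PySem.List.pyRange_one_eq_nil (by omega)]
    simp
termination_by (stop - e).toNat
decreasing_by omega

-- core: on a sorted (Pairwise ≤) nonempty list a :: t, B's scan equals A's range search
theorem scan_eq_rangeFind (t : List Int) : ∀ (a : Int),
    (a :: t).Pairwise (· ≤ ·) →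
    nextIdScan a t =
      (match ((PySem.List.pyRange a ((a :: t).getLast (by simp) + 1) 1).find?
          (fun e => !((a :: t).contains e))) with
       | some e => e
       | none => (a :: t).getLast (by simp) + 1) := by
  induction t with
  | nil =>
    intro a _
    simp [nextIdScan, PySem.List.pyRange_one_singleton, List.find?]
  | cons v t' ih =>
    intro a hp
    have hav : a ≤ v := (List.pairwise_cons.mp hp).1 v (by simp)
    have hpt : (v :: t').Pairwise (· ≤ ·) := (List.pairwise_cons.mp hp).2
    have hvt' : ∀ x ∈ t', v ≤ x := (List.pairwise_cons.mp hpt).1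
    have hL : v ≤ (v :: t').getLast (by simp) := head_le_getLast v t' hpt
    have hlast : (a :: v :: t').getLast (by simp) = (v :: t').getLast (by simp) := by
      simp [List.getLast]
    set L := (v :: t').getLast (by simp) with hLdef
    rw [hlast]
    by_cases hgap : v > a + 1
    · -- gap: scan returns a+1; the range search finds a+1 ∉ list
      have h1 : a < L + 1 := by omega
      have h2 : a + 1 < L + 1 := by omega
      rw [PySem.List.pyRange_one_cons h1, PySem.List.pyRange_one_cons h2]
      have hm1 : ¬ (a + 1 = v) := by omega
      have hm2 : (a + 1) ∉ t' := fun hx => by have := hvt' _ hx; omega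
      simp [nextIdScan, hgap, List.find?, hm1, hm2]
    · -- no gap: v = a or v = a+1; drop the prefix range(a, v), shrink membership
      have hscan : nextIdScan a (v :: t') = nextIdScan v t' := by
        simp [nextIdScan, hgap]
      rw [hscan, ih v hpt]
      have hsplit : PySem.List.pyRange a (L + 1) 1 =
          PySem.List.pyRange a v 1 ++ PySem.List.pyRange v (L + 1) 1 :=
        PySem.List.pyRange_one_append a v (L + 1) hav (by omega)
      rw [hsplit, List.find?_append]
      have hpre : (PySem.List.pyRange a v 1).find?
          (fun e => !((a :: v :: t').contains e)) = none := by
        rw [List.find?_eq_none]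
        intro x hx
        have hxr := (PySem.List.mem_pyRange_one).mp hx
        have hxa : x = a := by omega
        simp [hxa]
      rw [hpre, Option.none_or]
      have hcongr : (PySem.List.pyRange v (L + 1) 1).find?
            (fun e => !((a :: v :: t').contains e)) =
          (PySem.List.pyRange v (L + 1) 1).find?
            (fun e => !((v :: t').contains e)) := by
        apply find?_congr_mem
        intro x hx
        have hxr := (PySem.List.mem_pyRange_one).mp hx
        by_cases hxa : x = a
        · have hva : v = a := by omega
          simp [hxa, hva]
        · simp only [List.contains_eq_mem, List.mem_cons]
          simp [hxa]
      rw [hcongr]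

-- ===== VERDICT (by name: the statement is the Claim_ definition above) =====
theorem determine_next_id_spec : Claim_equal_determine_next_id := by
  intro ids _
  unfold Spec_determine_next_id determine_next_id determine_next_id_alt
  by_cases hnil : ids = []
  · simp [hnil]
  · simp only [hnil, ite_false]
    set s := PySem.List.sorted ids (fun x => x) false with hs
    have hsne : s ≠ [] := by
      rw [hs, Ne, PySem.List.sorted_eq_nil_iff]; exact hnil
    obtain ⟨a, t, hst⟩ := List.exists_cons_of_ne_nil hsne
    have hp : s.Pairwise (· ≤ ·) := by
      have := PySem.List.sorted_pairwise (xs := ids) (key := fun x => x)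
      rwa [← hs] at this
    rw [hst] at hp ⊢
    have h0 : PySem.List.pyGet? (a :: t) 0 = some a := PySem.List.pyGet?_zero_cons a t
    have hlast : PySem.List.pyGet? (a :: t) (-1) = some ((a :: t).getLast (by simp)) := by
      rw [PySem.List.pyGet?_neg_one, List.getLast?_eq_some_getLast]
    have hslice : PySem.List.slice (a :: t) (some 1) none = t := by
      have h := PySem.List.slice_from (a := 1) (a :: t) (by norm_num)
      simpa using h
    rw [h0, hlast, hslice]
    simp only [Option.getD_some]
    rw [rangeGapLoop_eq_find]
    exact (scan_eq_rangeFind t a hp).symm
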